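-- pv_equiv track=rewrite | github.com/delispanos-png/BoxVisio | backend/app/services/ingestion/base.py | normalize_stream_values
-- ===== SOURCE A (Python) =====
-- from typing import Any, Literal
--
-- OperationalIngestStream = Literal[
--     'sales_documents',
--     'purchase_documents',
--     'inventory_documents',
--     'cash_transactions',
--     'supplier_balances',
--     'customer_balances',
-- ]
--
-- ALL_OPERATIONAL_STREAMS: tuple[OperationalIngestStream, ...] = (
--     'sales_documents',
--     'purchase_documents',
--     'inventory_documents',
--     'cash_transactions',
--     'supplier_balances',
--     'customer_balances',
-- )
--
-- def normalize_stream_name(value: str | None) -> OperationalIngestStream | None: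
--     raw = str(value or '').strip().lower().replace('-', '_').replace(' ', '_')
--     aliases = {
--         'sales': 'sales_documents',
--         'sales_docs': 'sales_documents',
--         'sale_documents': 'sales_documents',
--         'sale_docs': 'sales_documents',
--         'purchases': 'purchase_documents',
--         'purchase_docs': 'purchase_documents',
--         'inventory': 'inventory_documents',
--         'warehouse_documents': 'inventory_documents',
--         'warehouse_docs': 'inventory_documents',
--         'cashflows': 'cash_transactions',
--         'cashflow': 'cash_transactions',
--         'cash': 'cash_transactions',
--         'supplier_balance': 'supplier_balances',
--         'customer_balance': 'customer_balances',
--     }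
--     candidate = aliases.get(raw, raw)
--     if candidate in ALL_OPERATIONAL_STREAMS:
--         return candidate  # type: ignore[return-value]
--     return None
--
-- def normalize_stream_values(values: list[str] | tuple[str, ...] | set[str] | None) -> list[OperationalIngestStream]:
--     if not values:
--         return []
--     out: list[OperationalIngestStream] = []
--     seen: set[str] = set()
--     for value in values:
--         stream = normalize_stream_name(value)
--         if stream and stream not in seen:
--             out.append(stream)
--             seen.add(stream)
--     return out
-- ===== SOURCE B (Python) =====
-- def normalize_stream_name(value):
--     raw = str(value or '').strip().lower().replace('-', '_').replace(' ', '_')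
--     aliases = {
--         'sales': 'sales_documents',
--         'sales_docs': 'sales_documents',
--         'sale_documents': 'sales_documents',
--         'sale_docs': 'sales_documents',
--         'purchases': 'purchase_documents',
--         'purchase_docs': 'purchase_documents',
--         'inventory': 'inventory_documents',
--         'warehouse_documents': 'inventory_documents',
--         'warehouse_docs': 'inventory_documents',
--         'cashflows': 'cash_transactions',
--         'cashflow': 'cash_transactions',
--         'cash': 'cash_transactions',
--         'supplier_balance': 'supplier_balances',
--         'customer_balance': 'customer_balances',
--     }
--     candidate = aliases.get(raw, raw)
--     if candidate in (
--         'sales_documents',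
--         'purchase_documents',
--         'inventory_documents',
--         'cash_transactions',
--         'supplier_balances',
--         'customer_balances',
--     ):
--         return candidate
--     return None
--
-- def normalize_stream_values(values):
--     if not values:
--         return []
--     first = {}
--     for i, value in reversed(list(enumerate(values))):
--         stream = normalize_stream_name(value)
--         if stream:
--             first[stream] = i  # descending scan: the last write is the earliest index
--     return sorted(first, key=first.__getitem__)
-- ===== Notes on version B (the rewrite author's own statement) =====
-- stated objective: alternative
-- what changed: B drops A's seen-set-plus-append loop: it scans the list backwards recording each stream's earliest index in a dict (later writes overwrite, no membership test on an output accumulator) and then sorts the distinct streams by that first-occurrence index.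
import Mathlib
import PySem

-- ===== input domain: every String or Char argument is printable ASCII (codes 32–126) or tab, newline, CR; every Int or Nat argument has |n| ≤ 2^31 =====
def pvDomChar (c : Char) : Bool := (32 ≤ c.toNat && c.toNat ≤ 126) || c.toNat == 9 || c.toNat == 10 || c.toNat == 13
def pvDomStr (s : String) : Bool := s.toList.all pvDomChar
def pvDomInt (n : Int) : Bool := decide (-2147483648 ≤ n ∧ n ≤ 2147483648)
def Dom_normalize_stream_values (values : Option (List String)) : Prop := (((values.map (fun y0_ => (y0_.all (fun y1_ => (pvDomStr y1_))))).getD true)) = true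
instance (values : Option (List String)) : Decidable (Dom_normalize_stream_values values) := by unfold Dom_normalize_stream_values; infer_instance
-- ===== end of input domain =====

-- B replaces A's seen-set append loop by a backward scan that records each stream's
-- earliest index in a dict (later writes overwrite) and then sorts the streams by that
-- index; objective: alternative (same asymptotic cost, different algorithm).

-- ===== PORT A =====
-- shared module helper (both Pythons call it verbatim)
def normalize_stream_name (value : String) : Option String :=
  let raw := PySem.Str.replace (PySem.Str.replace (PySem.Str.lower
    (PySem.Str.strip (if value = "" then "" else value))) "-" "_") " " "_"
  let aliases : PySem.Dict String String := PySem.Dict.ofList [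
    ("sales", "sales_documents"),
    ("sales_docs", "sales_documents"),
    ("sale_documents", "sales_documents"),
    ("sale_docs", "sales_documents"),
    ("purchases", "purchase_documents"),
    ("purchase_docs", "purchase_documents"),
    ("inventory", "inventory_documents"),
    ("warehouse_documents", "inventory_documents"),
    ("warehouse_docs", "inventory_documents"),
    ("cashflows", "cash_transactions"),
    ("cashflow", "cash_transactions"),
    ("cash", "cash_transactions"),
    ("supplier_balance", "supplier_balances"),
    ("customer_balance", "customer_balances")]
  let candidate := aliases.getD raw raw
  if candidate ∈ ["sales_documents", "purchase_documents", "inventory_documents",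
      "cash_transactions", "supplier_balances", "customer_balances"] then some candidate
  else none

def normalize_stream_values (values : Option (List String)) : List String :=
  match values with
  | none => []
  | some vs =>
    if vs = [] then []
    else
      (vs.foldl (fun (acc : List String × PySem.Set String) value =>
        match normalize_stream_name value with
        | some stream =>
          if stream ≠ "" ∧ stream ∉ acc.2 then (acc.1 ++ [stream], PySem.Set.add acc.2 stream)
          else acc
        | none => acc) ([], PySem.Set.empty)).1

-- ===== PORT B =====
def normalize_stream_values_alt (values : Option (List String)) : List String :=
  match values with
  | none => []
  | some vs =>
    if vs = [] then []
    else
      let first := ((PySem.List.enumerate vs 0).reverse).foldl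
        (fun (d : PySem.Dict String Int) p =>
          match normalize_stream_name p.2 with
          | some stream => if stream ≠ "" then d.insert stream p.1 else d
          | none => d) PySem.Dict.empty
      PySem.List.sorted first.keys (fun k => first.getD k 0)

-- ===== PRECONDITION & SPEC =====
def Spec_normalize_stream_values (values : Option (List String)) (out : List String) : Prop := out = normalize_stream_values_alt values
instance (values : Option (List String)) (out : List String) : Decidable (Spec_normalize_stream_values values out) := by unfold Spec_normalize_stream_values; infer_instance

-- ===== CLAIM (what is proved, stated in full; the proofs are below) =====
def Claim_equal_normalize_stream_values : Prop := ∀ (values : Option (List String)), Dom_normalize_stream_values values → Spec_normalize_stream_values values (normalize_stream_values values)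

-- ===== LEMMAS AND PROOFS =====
-- proof-side names for the two loop bodies (definitionally equal to the ports' inline lambdas)
def pvAstep (acc : List String × PySem.Set String) (value : String) : List String × PySem.Set String :=
  match normalize_stream_name value with
  | some stream =>
    if stream ≠ "" ∧ stream ∉ acc.2 then (acc.1 ++ [stream], PySem.Set.add acc.2 stream)
    else acc
  | none => acc

def pvBstep (d : PySem.Dict String Int) (p : Int × String) : PySem.Dict String Int :=
  match normalize_stream_name p.2 with
  | some stream => if stream ≠ "" then d.insert stream p.1 else d
  | none => d

def pvBfold (vs : List String) (s0 : Int) : PySem.Dict String Int :=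
  ((PySem.List.enumerate vs s0).reverse).foldl pvBstep PySem.Dict.empty

-- first-occurrence predicate and index
def pvP (a : String) (v : String) : Bool := normalize_stream_name v == some a

def pvFidx (vs : List String) (a : String) : Int :=
  match vs.findIdx? (pvP a) with
  | some k => (k : Int)
  | none => 0

theorem pv_ite_mem_some {L : List String} {c s : String}
    (h : (if c ∈ L then some c else none) = some s) : s ∈ L := by
  split at h
  · cases h; assumption
  · cases h

theorem pvF_mem {v s : String} (h : normalize_stream_name v = some s) :
    s ∈ ["sales_documents", "purchase_documents", "inventory_documents",
      "cash_transactions", "supplier_balances", "customer_balances"] := by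
  unfold normalize_stream_name at h
  exact pv_ite_mem_some h

theorem pvF_ne {v s : String} (h : normalize_stream_name v = some s) : s ≠ "" := by
  have hm := pvF_mem h
  simp only [List.mem_cons, List.not_mem_nil, or_false] at hm
  rcases hm with rfl|rfl|rfl|rfl|rfl|rfl <;> decide

theorem pvP_iff {a v : String} : pvP a v = true ↔ normalize_stream_name v = some a := by
  simp [pvP]

theorem pv_findIdx?_isSome_iff (vs : List String) (a : String) :
    (vs.findIdx? (pvP a)).isSome = true ↔ a ∈ vs.filterMap normalize_stream_name := by
  rw [List.findIdx?_isSome, List.any_eq_true]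
  constructor
  · rintro ⟨u, hu, hp⟩
    exact List.mem_filterMap.mpr ⟨u, hu, pvP_iff.mp hp⟩
  · rintro h
    obtain ⟨u, hu, hp⟩ := List.mem_filterMap.mp h
    exact ⟨u, hu, pvP_iff.mpr hp⟩

theorem pv_findIdx?_append_of_mem {vs : List String} {a : String} (t : List String)
    (h : a ∈ vs.filterMap normalize_stream_name) :
    (vs ++ t).findIdx? (pvP a) = vs.findIdx? (pvP a) := by
  obtain ⟨k, hk⟩ := Option.isSome_iff_exists.mp ((pv_findIdx?_isSome_iff vs a).mpr h)
  rw [List.findIdx?_append, hk]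
  rfl

theorem pv_fidx_append_of_mem {vs : List String} {a : String} (t : List String)
    (h : a ∈ vs.filterMap normalize_stream_name) :
    pvFidx (vs ++ t) a = pvFidx vs a := by
  unfold pvFidx
  rw [pv_findIdx?_append_of_mem t h]

-- A's loop is Set.update on the diagonal
theorem pvA_diag (vs : List String) (t : PySem.Set String) :
    vs.foldl pvAstep (t, t) = (PySem.Set.update t (vs.filterMap normalize_stream_name),
      PySem.Set.update t (vs.filterMap normalize_stream_name)) := by
  induction vs generalizing t with
  | nil => rfl
  | cons v rest ih =>
    rw [List.foldl_cons, List.filterMap_cons]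
    rcases hv : normalize_stream_name v with _ | s
    · rw [show pvAstep (t, t) v = (t, t) by unfold pvAstep; rw [hv], ih]
    · have hs := pvF_ne hv
      have hstep : pvAstep (t, t) v = (PySem.Set.add t s, PySem.Set.add t s) := by
        unfold pvAstep; rw [hv]; dsimp only
        by_cases hm : s ∈ t
        · rw [if_neg (fun hcon => hcon.2 hm), PySem.Set.add_of_mem hm]
        · rw [if_pos ⟨hs, hm⟩, PySem.Set.add_of_not_mem hm]
      rw [hstep, ih, PySem.Set.update_cons]

theorem pvA_eq (vs : List String) :
    (vs.foldl pvAstep ([], PySem.Set.empty)).1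
      = PySem.Set.ofList (vs.filterMap normalize_stream_name) := by
  have h := pvA_diag vs PySem.Set.empty
  rw [show List.foldl pvAstep ([], PySem.Set.empty) vs
        = List.foldl pvAstep (PySem.Set.empty, PySem.Set.empty) vs from rfl, h]
  rw [PySem.Set.ofList_eq_foldl]
  rfl

-- B's loop peeled at the front
theorem pv_enum_cons (v : String) (rest : List String) (s0 : Int) :
    PySem.List.enumerate (v :: rest) s0 = (s0, v) :: PySem.List.enumerate rest (s0 + 1) := by
  simp [PySem.List.enumerate]

theorem pvB_cons (v : String) (rest : List String) (s0 : Int) :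
    pvBfold (v :: rest) s0 = pvBstep (pvBfold rest (s0 + 1)) (s0, v) := by
  unfold pvBfold
  rw [pv_enum_cons, List.reverse_cons, List.foldl_append, List.foldl_cons, List.foldl_nil]

-- B's dict maps each stream to its first-occurrence index shifted by s0
theorem pvB_get? (vs : List String) (s0 : Int) (a : String) :
    (pvBfold vs s0).get? a = (vs.findIdx? (pvP a)).map (fun k => s0 + (k : Int)) := by
  induction vs generalizing s0 with
  | nil =>
    rw [show pvBfold [] s0 = PySem.Dict.empty by
          unfold pvBfold; rw [PySem.List.enumerate_nil]; rfl]
    simp [PySem.Dict.get?_empty]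
  | cons v rest ih =>
    rw [pvB_cons, List.findIdx?_cons]
    rcases hv : normalize_stream_name v with _ | s
    · have hp : pvP a v = false := by simp [pvP, hv]
      rw [show pvBstep (pvBfold rest (s0 + 1)) (s0, v) = pvBfold rest (s0 + 1) by
            unfold pvBstep; rw [hv], ih, hp]
      simp only [Bool.false_eq_true, if_false]
      cases hfi : List.findIdx? (pvP a) rest with
      | none => simp
      | some k => simp; ring
    · have hs := pvF_ne hv
      rw [show pvBstep (pvBfold rest (s0 + 1)) (s0, v)
            = (pvBfold rest (s0 + 1)).insert s s0 by unfold pvBstep; rw [hv]; dsimp only; rw [if_pos hs]]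
      rw [PySem.Dict.get?_insert]
      by_cases ha : a = s
      · subst ha
        have hp : pvP a v = true := pvP_iff.mpr hv
        rw [hp, if_pos rfl]
        simp
      · have hp : pvP a v = false := by
          rw [Bool.eq_false_iff]
          intro hc
          exact ha (by rw [pvP_iff.mp hc] at hv; exact Option.some_inj.mp hv)
        rw [if_neg ha, ih, hp]
        simp only [Bool.false_eq_true, if_false]
        cases hfi : List.findIdx? (pvP a) rest with
        | none => simp
        | some k => simp; ring

-- B's dict keys are the streams seen while scanning backwards
theorem pvB_keys (vs : List String) (s0 : Int) :
    (pvBfold vs s0).keys = PySem.Set.ofList (vs.reverse.filterMap normalize_stream_name) := by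
  induction vs generalizing s0 with
  | nil => rfl
  | cons v rest ih =>
    rw [pvB_cons, List.reverse_cons, List.filterMap_append]
    rcases hv : normalize_stream_name v with _ | s
    · rw [show pvBstep (pvBfold rest (s0 + 1)) (s0, v) = pvBfold rest (s0 + 1) by
            unfold pvBstep; rw [hv], ih]
      simp [hv]
    · have hs := pvF_ne hv
      rw [show pvBstep (pvBfold rest (s0 + 1)) (s0, v)
            = (pvBfold rest (s0 + 1)).insert s s0 by unfold pvBstep; rw [hv]; dsimp only; rw [if_pos hs]]
      rw [show List.filterMap normalize_stream_name [v] = [s] by simp [hv],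
        PySem.Set.ofList_append_singleton]
      by_cases hc : (pvBfold rest (s0 + 1)).contains s = true
      · rw [PySem.Dict.keys_insert_of_contains _ _ hc, ih]
        have hm : s ∈ PySem.Set.ofList (rest.reverse.filterMap normalize_stream_name) := by
          rw [← ih (s0 + 1)]
          exact ((PySem.Dict.contains_iff_mem_keys _ _).mp hc)
        rw [PySem.Set.add_of_mem hm]
      · rw [PySem.Dict.keys_insert_of_not_contains _ _ (by simpa using hc), ih]
        have hm : s ∉ PySem.Set.ofList (rest.reverse.filterMap normalize_stream_name) := by
          rw [← ih (s0 + 1)]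
          intro hmem
          rw [← PySem.Dict.contains_iff_mem_keys] at hmem
          simp [hmem] at hc
        rw [PySem.Set.add_of_not_mem hm]

-- first-occurrence order: the deduped stream list is strictly increasing in pvFidx
theorem pvPairwise (vs : List String) :
    (PySem.Set.ofList (vs.filterMap normalize_stream_name)).Pairwise
      (fun a b => pvFidx vs a < pvFidx vs b) := by
  induction vs using List.reverseRecOn with
  | nil => simp
  | append_singleton vs v ih =>
    rw [List.filterMap_append]
    have htrans : ∀ {l : List String},
        l.Pairwise (fun a b => pvFidx vs a < pvFidx vs b) →
        (∀ x ∈ l, x ∈ vs.filterMap normalize_stream_name) →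
        l.Pairwise (fun a b => pvFidx (vs ++ [v]) a < pvFidx (vs ++ [v]) b) := by
      intro l hl hmem
      refine hl.imp_of_mem ?_
      intro a b ha hb hlt
      rw [pv_fidx_append_of_mem [v] (hmem a ha), pv_fidx_append_of_mem [v] (hmem b hb)]
      exact hlt
    rcases hv : normalize_stream_name v with _ | s
    · rw [show List.filterMap normalize_stream_name [v] = [] by simp [hv], List.append_nil]
      exact htrans ih (fun x hx => (PySem.Set.mem_ofList _ _).mp hx)
    · rw [show List.filterMap normalize_stream_name [v] = [s] by simp [hv],
        PySem.Set.ofList_append_singleton]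
      by_cases hm : s ∈ PySem.Set.ofList (vs.filterMap normalize_stream_name)
      · rw [PySem.Set.add_of_mem hm]
        exact htrans ih (fun x hx => (PySem.Set.mem_ofList _ _).mp hx)
      · rw [PySem.Set.add_of_not_mem hm]
        rw [List.pairwise_append]
        refine ⟨htrans ih (fun x hx => (PySem.Set.mem_ofList _ _).mp hx), by simp, ?_⟩
        intro a ha b hb
        rw [List.mem_singleton] at hb
        subst hb
        have hamem : a ∈ vs.filterMap normalize_stream_name := (PySem.Set.mem_ofList _ _).mp ha
        obtain ⟨k, hk⟩ := Option.isSome_iff_exists.mp ((pv_findIdx?_isSome_iff vs a).mpr hamem)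
        have hklen : k < vs.length := (List.findIdx?_eq_some_iff_findIdx_eq.mp hk).1
        have hnone : vs.findIdx? (pvP b) = none := by
          cases hb : vs.findIdx? (pvP b) with
          | none => rfl
          | some j =>
            exfalso
            apply hm
            rw [PySem.Set.mem_ofList]
            exact (pv_findIdx?_isSome_iff vs b).mp (by rw [hb]; rfl)
        have hfb : pvFidx (vs ++ [v]) b = (vs.length : Int) := by
          unfold pvFidx
          rw [List.findIdx?_append, hnone]
          have : List.findIdx? (pvP b) [v] = some 0 := by
            rw [List.findIdx?_cons, if_pos (pvP_iff.mpr hv)]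
          rw [this]
          simp
        have hfa : pvFidx vs a = (k : Int) := by unfold pvFidx; rw [hk]
        rw [pv_fidx_append_of_mem [v] hamem, hfb, hfa]
        exact_mod_cast hklen

theorem pvMain (vs : List String) :
    (vs.foldl pvAstep ([], PySem.Set.empty)).1
      = PySem.List.sorted (pvBfold vs 0).keys (fun k => (pvBfold vs 0).getD k 0) := by
  rw [pvA_eq]
  have hperm : (PySem.Set.ofList (vs.filterMap normalize_stream_name)).Perm (pvBfold vs 0).keys := by
    rw [pvB_keys]
    refine (List.perm_ext_iff_of_nodup (PySem.Set.nodup_ofList _) (PySem.Set.nodup_ofList _)).mpr ?_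
    intro a
    rw [PySem.Set.mem_ofList, PySem.Set.mem_ofList, List.filterMap_reverse, List.mem_reverse]
  have hgetD : ∀ a ∈ PySem.Set.ofList (vs.filterMap normalize_stream_name),
      (pvBfold vs 0).getD a 0 = pvFidx vs a := by
    intro a ha
    rw [PySem.Set.mem_ofList] at ha
    obtain ⟨k, hk⟩ := Option.isSome_iff_exists.mp ((pv_findIdx?_isSome_iff vs a).mpr ha)
    have hg : (pvBfold vs 0).get? a = some ((k : Int)) := by
      rw [pvB_get?, hk]
      simp
    rw [PySem.Dict.getD_of_get?_eq_some _ _ hg]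
    unfold pvFidx
    rw [hk]
  refine (PySem.List.sorted_eq_of_perm_of_pairwise_lt _ _ _ hperm ?_).symm
  refine (pvPairwise vs).imp_of_mem ?_
  intro a b ha hb hlt
  rw [hgetD a ha, hgetD b hb]
  exact hlt

-- ===== VERDICT (by name: the statement is the Claim_ definition above) =====
theorem pvA_step_eq : (fun (acc : List String × PySem.Set String) value =>
    match normalize_stream_name value with
    | some stream =>
      if stream ≠ "" ∧ stream ∉ acc.2 then (acc.1 ++ [stream], PySem.Set.add acc.2 stream)
      else acc
    | none => acc) = pvAstep := by
  funext acc value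
  unfold pvAstep
  cases normalize_stream_name value <;> rfl

theorem pvB_step_eq : (fun (d : PySem.Dict String Int) (p : Int × String) =>
    match normalize_stream_name p.2 with
    | some stream => if stream ≠ "" then d.insert stream p.1 else d
    | none => d) = pvBstep := by
  funext d p
  unfold pvBstep
  cases normalize_stream_name p.2 <;> rfl

theorem normalize_stream_values_spec : Claim_equal_normalize_stream_values := by
  intro values _
  unfold Spec_normalize_stream_values
  cases values with
  | none => rfl
  | some vs =>
    rw [normalize_stream_values, normalize_stream_values_alt]
    by_cases h : vs = []
    · rw [if_pos h, if_pos h]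
    · rw [if_neg h, if_neg h]
      show (vs.foldl _ ([], PySem.Set.empty)).1
        = PySem.List.sorted
            (((PySem.List.enumerate vs 0).reverse).foldl _ PySem.Dict.empty).keys
            (fun k => (((PySem.List.enumerate vs 0).reverse).foldl
              (fun (d : PySem.Dict String Int) (p : Int × String) =>
                match normalize_stream_name p.2 with
                | some stream => if stream ≠ "" then d.insert stream p.1 else d
                | none => d) PySem.Dict.empty).getD k 0)
      rw [pvA_step_eq, pvB_step_eq]
      exact pvMain vs
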